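-- pv_equiv track=rewrite | github.com/kasztp/Wordle_Helper | app/wordle_logic.py | group_by_score
-- ===== SOURCE A (Python) =====
-- def group_by_score(scores: dict) -> dict:
--     score_groups = sorted(set(val for val in scores.values()), reverse=True)
--     grouped_words = {}
--     for number in score_groups:
--         wordgroup = []
--         for i in scores.items():
--             if i[1] == number:
--                 wordgroup.extend(i[0:1])
--         grouped_words[number] = sorted(wordgroup)
--     return grouped_words
-- ===== SOURCE B (Python) =====
-- def group_by_score(scores: dict) -> dict:
--     buckets = {}
--     for word, score in scores.items():
--         buckets.setdefault(score, []).append(word)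
--     return {score: sorted(buckets[score]) for score in sorted(buckets, reverse=True)}
-- ===== Notes on version B (the rewrite author's own statement) =====
-- stated objective: alternative
-- what changed: replaced the per-score-value rescan of the whole dict by a single bucketing pass into a dict keyed by score, then sorting the keys descending and each bucket once
import Mathlib
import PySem

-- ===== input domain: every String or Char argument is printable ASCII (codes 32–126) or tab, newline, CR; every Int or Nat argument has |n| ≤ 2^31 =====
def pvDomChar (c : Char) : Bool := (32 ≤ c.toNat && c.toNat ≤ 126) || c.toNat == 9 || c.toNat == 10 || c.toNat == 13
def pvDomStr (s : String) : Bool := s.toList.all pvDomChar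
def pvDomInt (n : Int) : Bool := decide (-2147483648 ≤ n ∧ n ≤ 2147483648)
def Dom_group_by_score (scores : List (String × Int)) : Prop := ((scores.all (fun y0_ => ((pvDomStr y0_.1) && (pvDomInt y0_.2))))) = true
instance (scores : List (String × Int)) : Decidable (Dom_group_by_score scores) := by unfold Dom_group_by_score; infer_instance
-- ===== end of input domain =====

-- B buckets the words by score in one pass over the dict, then sorts the keys
-- descending and each bucket once, where A rescans the whole dict per distinct score.

-- ===== PORT A =====
def group_by_score (scores : List (String × Int)) : List (Int × List String) :=
  let score_groups := PySem.List.sorted (PySem.Set.ofList (scores.map (·.2))) (fun v => v) true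
  let grouped_words := score_groups.foldl (fun gw number =>
    let wordgroup := scores.foldl (fun wg i => if i.2 == number then wg ++ [i.1] else wg) []
    gw.insert number (PySem.List.sorted wordgroup (fun w => w) false)) PySem.Dict.empty
  grouped_words.items

-- ===== PORT B =====
def group_by_score_alt (scores : List (String × Int)) : List (Int × List String) :=
  let buckets := scores.foldl (fun d p => d.modify p.2 [] (· ++ [p.1])) PySem.Dict.empty
  let sortedKeys := PySem.List.sorted buckets.keys (fun v => v) true
  (sortedKeys.foldl (fun out s =>
    out.insert s (PySem.List.sorted (buckets.getD s []) (fun w => w) false)) PySem.Dict.empty).items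

-- ===== PRECONDITION & SPEC =====
def Spec_group_by_score (scores : List (String × Int)) (out : List (Int × List String)) : Prop := out = group_by_score_alt scores
instance (scores : List (String × Int)) (out : List (Int × List String)) : Decidable (Spec_group_by_score scores out) := by unfold Spec_group_by_score; infer_instance

-- ===== CLAIM (what is proved, stated in full; the proofs are below) =====
def Claim_equal_group_by_score : Prop := ∀ (scores : List (String × Int)), Dom_group_by_score scores → Spec_group_by_score scores (group_by_score scores)

-- ===== LEMMAS AND PROOFS =====

-- keys of the bucket dict are exactly the distinct score values, in first-occurrence order
theorem pv_keys_buckets (scores : List (String × Int)) :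
    (scores.foldl (fun d p => d.modify p.2 [] (· ++ [p.1])) PySem.Dict.empty).keys
      = PySem.Set.ofList (scores.map (·.2)) := by
  rw [PySem.Dict.keys_foldl_modify_key]
  simp [PySem.Set.update, PySem.Set.ofList_eq_foldl, PySem.Dict.keys_empty, List.foldl_map]

-- each bucket holds the words with that score, in insertion order
theorem pv_bucket_eq (scores : List (String × Int)) (n : Int) :
    (scores.foldl (fun d p => d.modify p.2 [] (· ++ [p.1])) PySem.Dict.empty).getD n []
      = (scores.filter (fun p => p.2 == n)).map (·.1) := by
  have h : scores.foldl (fun d p => d.modify p.2 [] (· ++ [p.1])) PySem.Dict.empty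
      = (scores.map Prod.swap).foldl (fun d q => d.modify q.1 [] (· ++ [q.2])) PySem.Dict.empty := by
    rw [List.foldl_map]; rfl
  rw [h, PySem.Dict.getD_foldl_modify_append]
  simp [List.filter_map, Function.comp_def, Prod.swap]

-- ===== VERDICT (by name: the statement is the Claim_ definition above) =====
theorem group_by_score_spec : Claim_equal_group_by_score := by
  intro scores _
  show group_by_score scores = group_by_score_alt scores
  simp only [group_by_score, group_by_score_alt, pv_keys_buckets, pv_bucket_eq,
    PySem.List.foldl_append_if, List.nil_append]
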